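-- pv_equiv track=rewrite | github.com/Lipovitsch/report-generataor | ConfluenceDataloader.py | replace_signs_html_to_dataframe
-- ===== SOURCE A (Python) =====
-- DF_NEWLINE_CHAR = "///n///"
--
-- DF_STRONG_START_CHAR = "///ss///"
--
-- DF_STRONG_END_CHAR = "///es///"
--
-- DF_EM_START_CHAR = "///sem///"
--
-- DF_EM_END_CHAR = "///eem///"
--
-- DF_DIV_DISPLAY_START_CHAR = "///sdd///"
--
-- DF_DIV_DISPLAY_END_CHAR = "///edd///"
--
-- def replace_signs_html_to_dataframe(conf_page_body: str, req_div_list: list[str]):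
--     """Replace certain characters in the html code before converting to dataframe
--     to avoid losing them
--     """
--
--     signs_to_replace = {
--         '<br />': DF_NEWLINE_CHAR,
--         '<strong>': DF_STRONG_START_CHAR,
--         '</strong>': DF_STRONG_END_CHAR,
--         '<em>': DF_EM_START_CHAR,
--         '</em>': DF_EM_END_CHAR,
--         '<div style="display: none;">': DF_DIV_DISPLAY_START_CHAR,
--     }
--
--     div_display_search_index = 0
--     for i in range(conf_page_body.count('<div style="display: none;">')):
--         div_display_start = conf_page_body.find('<div style="display: none;">', div_display_search_index)
--         div_display_end_start = conf_page_body.find('</div>', div_display_start)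
--         div_display_search_index = div_display_start + len('<div style="display: none;">')
--         conf_page_body = conf_page_body[:div_display_end_start] + DF_DIV_DISPLAY_END_CHAR + conf_page_body[div_display_end_start + 6:]
--
--     if len(req_div_list) > 0:
--         for i in range(len(req_div_list)):
--             signs_to_replace[req_div_list[i]] = f"///div{i}///"
--
--     for key in signs_to_replace.keys():
--         conf_page_body = conf_page_body.replace(key, signs_to_replace[key])
--
--     return conf_page_body
-- ===== SOURCE B (Python) =====
-- DF_NEWLINE_CHAR = "///n///"
-- DF_STRONG_START_CHAR = "///ss///"
-- DF_STRONG_END_CHAR = "///es///"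
-- DF_EM_START_CHAR = "///sem///"
-- DF_EM_END_CHAR = "///eem///"
-- DF_DIV_DISPLAY_START_CHAR = "///sdd///"
-- DF_DIV_DISPLAY_END_CHAR = "///edd///"
--
-- def replace_signs_html_to_dataframe(conf_page_body: str, req_div_list: list[str]):
--     """Replace certain characters in the html code before converting to dataframe
--     to avoid losing them
--     """
--     OPEN_TAG = '<div style="display: none;">'
--     CLOSE_TAG = '</div>'
--     # one left-to-right scan: each '</div>' is turned into the end token exactly
--     # when an unconsumed display-none div-open precedes it
--     out = []
--     i = 0
--     pending = 0
--     n = len(conf_page_body)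
--     while i < n:
--         c = conf_page_body[i]
--         if c == '<':
--             if pending > 0 and conf_page_body.startswith(CLOSE_TAG, i):
--                 out.append(DF_DIV_DISPLAY_END_CHAR)
--                 pending -= 1
--                 i += 6
--                 continue
--             if conf_page_body.startswith(OPEN_TAG, i):
--                 out.append(OPEN_TAG)
--                 pending += 1
--                 i += 28
--                 continue
--         out.append(c)
--         i += 1
--     body = ''.join(out)
--
--     replacements = {
--         '<br />': DF_NEWLINE_CHAR,
--         '<strong>': DF_STRONG_START_CHAR,
--         '</strong>': DF_STRONG_END_CHAR,
--         '<em>': DF_EM_START_CHAR,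
--         '</em>': DF_EM_END_CHAR,
--         OPEN_TAG: DF_DIV_DISPLAY_START_CHAR,
--     }
--     for idx, div in enumerate(req_div_list):
--         replacements[div] = f"///div{idx}///"
--     for key, value in replacements.items():
--         body = body.replace(key, value)
--     return body
-- ===== Notes on version B (the rewrite author's own statement) =====
-- stated objective: alternative
-- what changed: A repeatedly find()s each display-none div and resplices the whole page string once per div (then applies the token replacements); B makes one left-to-right scan with a pending-open counter that emits the end token for each '</div>' matched to an earlier unconsumed open, building the output in a single buffer.
import Mathlib
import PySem

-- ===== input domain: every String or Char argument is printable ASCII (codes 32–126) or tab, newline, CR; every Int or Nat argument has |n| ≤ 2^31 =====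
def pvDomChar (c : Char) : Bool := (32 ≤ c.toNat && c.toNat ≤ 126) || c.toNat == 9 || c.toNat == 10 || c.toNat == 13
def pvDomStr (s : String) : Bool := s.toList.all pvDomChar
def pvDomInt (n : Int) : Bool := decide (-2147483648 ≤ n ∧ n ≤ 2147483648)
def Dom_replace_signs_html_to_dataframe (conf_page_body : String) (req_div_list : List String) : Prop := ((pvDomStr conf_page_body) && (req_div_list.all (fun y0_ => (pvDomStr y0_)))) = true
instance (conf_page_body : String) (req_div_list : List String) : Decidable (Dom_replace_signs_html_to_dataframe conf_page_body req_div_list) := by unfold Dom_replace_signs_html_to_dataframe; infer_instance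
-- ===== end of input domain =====

-- B replaces A's find-and-resplice loop over the whole page by one left-to-right scan that
-- pairs each '<div style="display: none;">' with the next unconsumed '</div>' (alternative
-- algorithm, same cost on these inputs; unmatched divs are excluded by Pre_, see below).

-- shared string constants (the module-level DF_* constants and the two tags)
def pvOpenS : String := "<div style=\"display: none;\">"
def pvCloseS : String := "</div>"
def pvEddS : String := "///edd///"
def pvBaseSigns : List (String × String) :=
  [("<br />", "///n///"), ("<strong>", "///ss///"), ("</strong>", "///es///"),
   ("<em>", "///sem///"), ("</em>", "///eem///"), (pvOpenS, "///sdd///")]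
def pvDivTok (i : Int) : String := "///div" ++ PySem.Int.toStr i ++ "///"

-- ===== PORT A =====
-- the div loop: for i in range(count): find open from search index, find '</div>' from there, resplice
def pvA_loop : Nat → String → Int → String
  | 0, body, _ => body
  | n+1, body, j =>
      let ds := PySem.Str.findFrom body pvOpenS j
      let de := PySem.Str.findFrom body pvCloseS ds
      pvA_loop n (PySem.Str.slice body none (some de) ++ pvEddS ++ PySem.Str.slice body (some (de+6)) none) (ds + 28)

def replace_signs_html_to_dataframe (conf_page_body : String) (req_div_list : List String) : String :=
  let body := pvA_loop (PySem.Str.count conf_page_body pvOpenS) conf_page_body 0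
  let d0 : PySem.Dict String String := ⟨pvBaseSigns⟩
  let d := if 0 < PySem.List.len req_div_list then
      (PySem.List.pyRange 0 (PySem.List.len req_div_list)).foldl
        (fun d i => d.insert (PySem.List.pyGetD req_div_list i "") (pvDivTok i)) d0
    else d0
  d.keys.foldl (fun b k => PySem.Str.replace b k (d.getD k "")) body

-- ===== PORT B =====
def pvOpenL : List Char := pvOpenS.toList
def pvCloseL : List Char := pvCloseS.toList
def pvEddL : List Char := pvEddS.toList

-- Source B's while-loop over the character index i, with fuel = remaining length (i grows each step);
-- s.startswith(tag, i) is ported exactly as tag.isPrefixOf (s.drop i)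
def pvB_go : Nat → List Char → Nat → Nat → List Char → List Char
  | 0, _, _, _, acc => acc
  | fuel+1, s, i, pending, acc =>
    if h : i < s.length then
      if s[i] = '<' then
        if 0 < pending ∧ pvCloseL.isPrefixOf (s.drop i) then
          pvB_go fuel s (i+6) (pending-1) (acc ++ pvEddL)
        else if pvOpenL.isPrefixOf (s.drop i) then
          pvB_go fuel s (i+28) (pending+1) (acc ++ pvOpenL)
        else pvB_go fuel s (i+1) pending (acc ++ [s[i]])
      else pvB_go fuel s (i+1) pending (acc ++ [s[i]])
    else acc

def replace_signs_html_to_dataframe_alt (conf_page_body : String) (req_div_list : List String) : String :=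
  let body := String.ofList (pvB_go conf_page_body.toList.length conf_page_body.toList 0 0 [])
  let d := (PySem.List.enumerate req_div_list).foldl
      (fun d p => d.insert p.2 (pvDivTok p.1)) (⟨pvBaseSigns⟩ : PySem.Dict String String)
  d.items.foldl (fun b kv => PySem.Str.replace b kv.1 kv.2) body

-- ===== PRECONDITION & SPEC =====
-- number of positions where the open tag '<div style="display: none;">' starts
def pvPosCount : List Char → Nat
  | [] => 0
  | c :: t => (if pvOpenL.isPrefixOf (c :: t) then 1 else 0) + pvPosCount t

-- number of positions where '</div>' starts
def pvPosCountC : List Char → Nat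
  | [] => 0
  | c :: t => (if pvCloseL.isPrefixOf (c :: t) then 1 else 0) + pvPosCountC t

-- Pre_ excludes pages in which some '<div style="display: none;">' has no matching later
-- '</div>' (greedy left-to-right pairing) — stated in closed form: every suffix of the page
-- contains at least as many '</div>' starts as open-tag starts. Outside Pre_, A's find()
-- returns -1 which is silently read as a slice bound, so A returns a resplice of the page
-- (last character cut, end token and a duplicated tail inserted) that only A's in-place loop
-- can produce — an unmatchable accident; B leaves the unmatched div untouched there.
def Pre_replace_signs_html_to_dataframe (conf_page_body : String) (req_div_list : List String) : Prop :=
  ∀ q ≤ conf_page_body.toList.length,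
    pvPosCount (conf_page_body.toList.drop q) ≤ pvPosCountC (conf_page_body.toList.drop q)
instance (conf_page_body : String) (req_div_list : List String) : Decidable (Pre_replace_signs_html_to_dataframe conf_page_body req_div_list) := by unfold Pre_replace_signs_html_to_dataframe; infer_instance

def pvWitness_replace_signs_html_to_dataframe : String × List String :=
  ("<div style=\"display: none;\">x</div>", ["<x>"])

def Spec_replace_signs_html_to_dataframe (conf_page_body : String) (req_div_list : List String) (out : String) : Prop :=
  out = replace_signs_html_to_dataframe_alt conf_page_body req_div_list
instance (conf_page_body : String) (req_div_list : List String) (out : String) : Decidable (Spec_replace_signs_html_to_dataframe conf_page_body req_div_list out) := by unfold Spec_replace_signs_html_to_dataframe; infer_instance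

-- ===== CLAIM (what is proved, stated in full; the proofs are below) =====
def Claim_equal_replace_signs_html_to_dataframe : Prop := ∀ (conf_page_body : String) (req_div_list : List String), Dom_replace_signs_html_to_dataframe conf_page_body req_div_list → Pre_replace_signs_html_to_dataframe conf_page_body req_div_list → Spec_replace_signs_html_to_dataframe conf_page_body req_div_list (replace_signs_html_to_dataframe conf_page_body req_div_list)

-- ===== LEMMAS AND PROOFS =====

-- the one-pass scan, on lists, returning (output, unmatched opens); the common specification
-- both ports are reduced to
def pvScan : List Char → Nat → List Char × Nat
  | [], p => ([], p)
  | c :: t, p =>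
    if 0 < p ∧ pvCloseL.isPrefixOf (c :: t) then
      let r := pvScan ((c :: t).drop 6) (p-1); (pvEddL ++ r.1, r.2)
    else if pvOpenL.isPrefixOf (c :: t) then
      let r := pvScan ((c :: t).drop 28) (p+1); (pvOpenL ++ r.1, r.2)
    else
      let r := pvScan t p; (c :: r.1, r.2)
  termination_by s _ => s.length
  decreasing_by all_goals { simp only [List.drop_succ_cons, List.length_cons, List.length_drop]; omega }

-- list-level mirror of A's div loop
def pvALoopL : Nat → List Char → Int → List Char
  | 0, s, _ => s
  | n+1, s, j =>
      let ds := PySem.Chars.findFrom s pvOpenL j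
      let de := PySem.Chars.findFrom s pvCloseL ds
      pvALoopL n (PySem.List.slice s none (some de) ++ pvEddL ++ PySem.List.slice s (some (de+6)) none) (ds + 28)


-- ---- basic facts about the three literals ----
theorem pvHead?_of_prefix {t u : List Char} (h : t <+: u) (hne : t ≠ []) : u.head? = t.head? := by
  obtain ⟨r, rfl⟩ := h; cases t with
  | nil => exact absurd rfl hne
  | cons a t' => simp

theorem pvGet?_of_prefix {t u : List Char} (h : t <+: u) {q : Nat} (hq : q < t.length) : u[q]? = t[q]? := by
  obtain ⟨r, rfl⟩ := h; rw [List.getElem?_append_left hq]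

theorem pvNotTag_of_head {u : List Char} (h : u.head? ≠ some '<') :
    ¬ pvOpenL <+: u ∧ ¬ pvCloseL <+: u := by
  constructor <;> intro hp <;> exact h ((pvHead?_of_prefix hp (by decide)).trans (by decide))

theorem pvNot_close_of_open {u : List Char} (h : pvOpenL <+: u) : ¬ pvCloseL <+: u := by
  intro hc
  have : pvCloseL <+: pvOpenL := List.prefix_of_prefix_length_le hc h (by decide)
  exact absurd this (by decide)

theorem pvNoTag_inside_open {u : List Char} {q : Nat} (h : pvOpenL <+: u) (h0 : 0 < q) (h28 : q < 28) :
    ¬ pvOpenL <+: u.drop q ∧ ¬ pvCloseL <+: u.drop q := by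
  apply pvNotTag_of_head
  rw [List.head?_drop, pvGet?_of_prefix h (by simpa [pvOpenL, pvOpenS] using h28)]
  have hch : ∀ q : Nat, q < 28 → 0 < q → pvOpenL[q]? ≠ some '<' := by decide
  exact hch q h28 h0

theorem pvNoTag_inside_close {u : List Char} {q : Nat} (h : pvCloseL <+: u) (h0 : 0 < q) (h6 : q < 6) :
    ¬ pvOpenL <+: u.drop q ∧ ¬ pvCloseL <+: u.drop q := by
  apply pvNotTag_of_head
  rw [List.head?_drop, pvGet?_of_prefix h (by simpa [pvCloseL, pvCloseS] using h6)]
  have hch : ∀ q : Nat, q < 6 → 0 < q → pvCloseL[q]? ≠ some '<' := by decide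
  exact hch q h6 h0

-- ---- one-step unfoldings of the scan ----
theorem pvScan_nil (p : Nat) : pvScan [] p = ([], p) := by simp [pvScan]

theorem pvScan_close {u : List Char} {p : Nat} (hc : pvCloseL <+: u) (hp : 0 < p) :
    pvScan u p = (pvEddL ++ (pvScan (u.drop 6) (p-1)).1, (pvScan (u.drop 6) (p-1)).2) := by
  obtain ⟨c, t, rfl⟩ : ∃ c t, u = c :: t := by
    cases u with
    | nil => exact absurd hc (by decide)
    | cons c t => exact ⟨c, t, rfl⟩
  rw [pvScan, if_pos ⟨hp, List.isPrefixOf_iff_prefix.mpr hc⟩]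

theorem pvScan_open {u : List Char} {p : Nat} (ho : pvOpenL <+: u) :
    pvScan u p = (pvOpenL ++ (pvScan (u.drop 28) (p+1)).1, (pvScan (u.drop 28) (p+1)).2) := by
  obtain ⟨c, t, rfl⟩ : ∃ c t, u = c :: t := by
    cases u with
    | nil => exact absurd ho (by decide)
    | cons c t => exact ⟨c, t, rfl⟩
  rw [pvScan, if_neg (by
      rintro ⟨-, hc⟩
      exact pvNot_close_of_open ho (List.isPrefixOf_iff_prefix.mp hc)),
    if_pos (List.isPrefixOf_iff_prefix.mpr ho)]

theorem pvScan_skip1 {c : Char} {t : List Char} {p : Nat}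
    (h1 : ¬ (0 < p ∧ pvCloseL <+: (c :: t))) (h2 : ¬ pvOpenL <+: (c :: t)) :
    pvScan (c :: t) p = (c :: (pvScan t p).1, (pvScan t p).2) := by
  rw [pvScan, if_neg (by
      rintro ⟨hp, hc⟩
      exact h1 ⟨hp, List.isPrefixOf_iff_prefix.mp hc⟩),
    if_neg (fun ho => h2 (List.isPrefixOf_iff_prefix.mp ho))]


theorem pvEdd_no_lt : ∀ c ∈ pvEddL, c ≠ '<' := by
  have h : pvEddL.all (fun c => c != '<') = true := by decide
  intro c hc
  simpa using List.all_eq_true.mp h c hc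

-- a block without '<' is copied verbatim at any pending count
theorem pvScan_copy : ∀ (m r : List Char) (p : Nat), (∀ c ∈ m, c ≠ '<') →
    pvScan (m ++ r) p = (m ++ (pvScan r p).1, (pvScan r p).2)
  | [], r, p, _ => by simp
  | c :: m', r, p, hm => by
    have hh := pvNotTag_of_head (u := c :: (m' ++ r)) (by simpa using hm c (by simp))
    simp only [List.cons_append]
    rw [pvScan_skip1 (fun h => hh.2 h.2) hh.1,
      pvScan_copy m' r p (fun x hx => hm x (by simp [hx]))]

-- at pending 0 an open-free region is copied verbatim
theorem pvScan_skip : ∀ (k : Nat) (u : List Char), k ≤ u.length →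
    (∀ q < k, ¬ pvOpenL <+: u.drop q) →
    pvScan u 0 = (u.take k ++ (pvScan (u.drop k) 0).1, (pvScan (u.drop k) 0).2)
  | 0, u, _, _ => by simp
  | k+1, u, hk, hno => by
    cases u with
    | nil => simp at hk
    | cons c t =>
      have h2 : ¬ pvOpenL <+: (c :: t) := by simpa using hno 0 (by omega)
      rw [pvScan_skip1 (by simp) h2,
        pvScan_skip k t (by simpa using hk) (fun q hq => by simpa using hno (q+1) (by omega))]
      simp

-- with no close tag anywhere the pending count never decreases
theorem pvScan_pend_ge : ∀ (u : List Char) (p : Nat), (∀ q, ¬ pvCloseL <+: u.drop q) →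
    p ≤ (pvScan u p).2
  | [], p, _ => by simp [pvScan_nil]
  | c :: t, p, hnc => by
    by_cases ho : pvOpenL <+: (c :: t)
    · rw [pvScan_open ho]
      have h := pvScan_pend_ge ((c :: t).drop 28) (p+1)
        (fun q => by rw [List.drop_drop]; exact hnc (28+q))
      omega
    · rw [pvScan_skip1 (fun h => (hnc 0) (by simpa using h.2)) ho]
      exact pvScan_pend_ge t p (fun q => by simpa using hnc (q+1))
  termination_by u _ _ => u.length
  decreasing_by all_goals { simp only [List.drop_succ_cons, List.length_cons, List.length_drop]; omega }

-- THE KEY LEMMA: replacing the first close tag (at position a) by the end token and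
-- dropping one pending open does not change the rest of the scan
theorem pvScan_splice : ∀ (a : Nat) (w : List Char) (p : Nat),
    pvCloseL <+: w.drop a → (∀ q < a, ¬ pvCloseL <+: w.drop q) →
    pvScan w (p+1) = pvScan (w.take a ++ pvEddL ++ w.drop (a+6)) p := by
  intro a
  induction a using Nat.strong_induction_on with
  | _ a IH =>
    intro w p hca hno
    have halen : a < w.length := by
      by_contra h
      rw [List.drop_eq_nil_of_le (by omega)] at hca
      exact absurd hca (by decide)
    rcases Nat.eq_zero_or_pos a with rfl | hapos
    · rw [List.drop_zero] at hca
      rw [pvScan_close hca (by omega), List.take_zero, List.nil_append, Nat.zero_add,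
        pvScan_copy pvEddL (w.drop 6) p pvEdd_no_lt]
      simp
    · have hc0 : ¬ pvCloseL <+: w := by simpa using hno 0 hapos
      by_cases ho : pvOpenL <+: w
      · have h28 : 28 ≤ a := by
          by_contra h
          exact (pvNoTag_inside_open ho hapos (by omega)).2 hca
        have htka : pvOpenL <+: w.take a :=
          List.prefix_take_iff.mpr ⟨ho, by rw [(by decide : pvOpenL.length = 28)]; omega⟩
        have hOw' : pvOpenL <+: w.take a ++ pvEddL ++ w.drop (a+6) := by
          obtain ⟨y, hy⟩ := htka
          exact ⟨y ++ (pvEddL ++ w.drop (a+6)), by rw [← List.append_assoc, hy, ← List.append_assoc]⟩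
        rw [pvScan_open ho, pvScan_open hOw']
        have hdrop28 : (w.take a ++ pvEddL ++ w.drop (a+6)).drop 28
            = (w.drop 28).take (a-28) ++ pvEddL ++ (w.drop 28).drop (a-28+6) := by
          rw [List.append_assoc, List.drop_append_of_le_length (by simp [List.length_take]; omega),
            List.drop_take, List.drop_drop, (by omega : 28 + (a-28+6) = a+6), List.append_assoc]
        have hrec := IH (a-28) (by omega) (w.drop 28) (p+1)
          (by rw [List.drop_drop, (by omega : 28 + (a-28) = a)]; exact hca)
          (fun q hq => by rw [List.drop_drop]; exact hno (28+q) (by omega))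
        rw [hdrop28, ← hrec]
      · obtain ⟨c, t, rfl⟩ : ∃ c t, w = c :: t := by
          cases w with
          | nil => simp at halen
          | cons c t => exact ⟨c, t, rfl⟩
        obtain ⟨a', rfl⟩ : ∃ a', a = a'+1 := ⟨a-1, by omega⟩
        have hw'eq : (c :: t).take (a'+1) ++ pvEddL ++ (c :: t).drop (a'+1+6)
            = c :: (t.take a' ++ pvEddL ++ t.drop (a'+6)) := by
          rw [List.take_succ_cons, (by omega : a'+1+6 = (a'+6)+1), List.drop_succ_cons]
          simp
        have htlen : a' ≤ t.length := by simp at halen; omega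
        have hlen_take : (t.take a').length = a' := by simp [List.length_take]; omega
        set t' := t.take a' ++ pvEddL ++ t.drop (a'+6) with ht'
        have hga : ∀ i : Nat, a' ≤ i → i < a' + 9 → t'[i]? = pvEddL[i - a']? := by
          intro i hi1 hi2
          rw [ht', List.append_assoc, List.getElem?_append_right (by rw [hlen_take]; exact hi1),
            List.getElem?_append_left (by rw [hlen_take, (by decide : pvEddL.length = 9)]; omega),
            hlen_take]
        have hOpen' : ¬ pvOpenL <+: c :: t' := by
          intro h
          by_cases hb : 28 ≤ a'+1
          · apply ho
            rw [List.prefix_iff_eq_take] at h ⊢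
            exact h.trans (by
              rw [(by decide : pvOpenL.length = 28), ← hw'eq, List.append_assoc,
                List.take_append_of_le_length (by simp [List.length_take]; omega),
                List.take_take, (by omega : min 28 (a'+1) = 28)])
          · have h1 : (c :: t')[a'+1]? = some '/' := by
              simp only [List.getElem?_cons_succ]
              rw [hga a' (le_refl _) (by omega), Nat.sub_self]
              decide
            have h2 := pvGet?_of_prefix h (q := a'+1)
              (by rw [(by decide : pvOpenL.length = 28)]; omega)
            rw [h1] at h2
            have h3 : ∀ i : Nat, i < 28 → pvOpenL[i]? ≠ some '/' := by decide
            exact h3 (a'+1) (by omega) h2.symm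
        have hClose' : ¬ pvCloseL <+: c :: t' := by
          intro h
          by_cases hb : 6 ≤ a'+1
          · apply hc0
            rw [List.prefix_iff_eq_take] at h ⊢
            exact h.trans (by
              rw [(by decide : pvCloseL.length = 6), ← hw'eq, List.append_assoc,
                List.take_append_of_le_length (by simp [List.length_take]; omega),
                List.take_take, (by omega : min 6 (a'+1) = 6)])
          · rcases Nat.lt_or_ge a' 1 with h1 | h1
            · obtain rfl : a' = 0 := by omega
              have hx : (c :: t')[2]? = some '/' := by
                simp only [List.getElem?_cons_succ]
                rw [hga 1 (by omega) (by omega)]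
                decide
              have h2 := pvGet?_of_prefix h (q := 2) (by decide)
              rw [hx] at h2
              exact absurd h2.symm (by decide)
            · have hx : (c :: t')[a'+1]? = some '/' := by
                simp only [List.getElem?_cons_succ]
                rw [hga a' (le_refl _) (by omega), Nat.sub_self]
                decide
              have h2 := pvGet?_of_prefix h (q := a'+1)
                (by rw [(by decide : pvCloseL.length = 6)]; omega)
              rw [hx] at h2
              have h3 : ∀ i : Nat, 2 ≤ i → i < 6 → pvCloseL[i]? ≠ some '/' := by decide
              exact h3 (a'+1) (by omega) (by omega) h2.symm
        have hrec := IH a' (by omega) t p (by simpa using hca)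
          (fun q hq => by simpa using hno (q+1) (by omega))
        rw [← ht'] at hrec
        rw [pvScan_skip1 (fun hx => hc0 hx.2) ho, hw'eq,
          pvScan_skip1 (fun hx => hClose' hx.2) hOpen', hrec]


theorem pvPosCount_cons (c : Char) (t : List Char) :
    pvPosCount (c :: t) = (if pvOpenL.isPrefixOf (c :: t) then 1 else 0) + pvPosCount t := rfl

theorem pvPosCount_drop_no_open : ∀ (k : Nat) (u : List Char),
    (∀ q < k, ¬ pvOpenL <+: u.drop q) → pvPosCount u = pvPosCount (u.drop k)
  | 0, u, _ => by simp
  | k+1, u, hno => by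
    cases u with
    | nil => simp
    | cons c t =>
      rw [pvPosCount_cons, if_neg (fun hb =>
          (hno 0 (by omega)) (by simpa using List.isPrefixOf_iff_prefix.mp hb)),
        List.drop_succ_cons]
      simpa using pvPosCount_drop_no_open k t (fun q hq => by simpa using hno (q+1) (by omega))

theorem pvPosCount_open {u : List Char} (h : pvOpenL <+: u) :
    pvPosCount u = 1 + pvPosCount (u.drop 28) := by
  obtain ⟨c, t, rfl⟩ : ∃ c t, u = c :: t := by
    cases u with
    | nil => exact absurd h (by decide)
    | cons c t => exact ⟨c, t, rfl⟩
  rw [pvPosCount_cons, if_pos (List.isPrefixOf_iff_prefix.mpr h),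
    (by norm_num : (28:Nat) = 27+1), List.drop_succ_cons]
  congr 1
  exact pvPosCount_drop_no_open 27 t (fun q hq => by
    simpa using (pvNoTag_inside_open h (q := q+1) (by omega) (by omega)).1)

theorem pvPosCount_eq_zero_iff : ∀ (u : List Char), (pvPosCount u = 0 ↔ ∀ q, ¬ pvOpenL <+: u.drop q)
  | [] => by
    constructor
    · intro _ q hp
      rw [List.drop_nil] at hp
      exact absurd hp (by decide)
    · intro _; rfl
  | c :: t => by
    rw [pvPosCount_cons]
    constructor
    · intro h q
      have h1 : ¬ pvOpenL.isPrefixOf (c :: t) := by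
        intro hb; rw [if_pos hb] at h; omega
      cases q with
      | zero => simpa using fun hp => h1 (List.isPrefixOf_iff_prefix.mpr hp)
      | succ q' =>
        rw [if_neg h1] at h
        simpa using ((pvPosCount_eq_zero_iff t).mp (by omega)) q'
    · intro hq
      rw [if_neg (fun hb => (hq 0) (by simpa using List.isPrefixOf_iff_prefix.mp hb))]
      simpa using (pvPosCount_eq_zero_iff t).mpr (fun q => by simpa using hq (q+1))

-- where find points when we know the first occurrence
theorem pvFind_eq_of_first {u sub : List Char} {k : Nat} (h1 : sub <+: u.drop k)
    (h2 : ∀ q < k, ¬ sub <+: u.drop q) : PySem.Chars.find u sub = (k : Int) := by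
  have hinf : sub <:+: u := (h1.isInfix).trans (List.drop_suffix k u).isInfix
  have hnn : 0 ≤ PySem.Chars.find u sub := (PySem.Chars.find_nonneg_iff u sub).mpr hinf
  obtain ⟨hsp, hmin⟩ := PySem.Chars.find_spec hnn
  rcases lt_trichotomy (PySem.Chars.find u sub).toNat k with h | h | h
  · exact absurd hsp (h2 _ h)
  · rw [← h]; omega
  · exact absurd h1 (hmin k h)


theorem pvPosCount_no_open_head {c : Char} {t : List Char} (h : ¬ pvOpenL <+: c :: t) :
    pvPosCount (c :: t) = pvPosCount t := by
  rw [pvPosCount_cons, if_neg (fun hb => h (List.isPrefixOf_iff_prefix.mp hb))]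
  omega

theorem pvPosCount_append_no_lt : ∀ (m r : List Char), (∀ c ∈ m, c ≠ '<') →
    pvPosCount (m ++ r) = pvPosCount r
  | [], r, _ => rfl
  | c :: m', r, hm => by
    rw [List.cons_append,
      pvPosCount_no_open_head (pvNotTag_of_head (by simpa using hm c (by simp))).1]
    exact pvPosCount_append_no_lt m' r (fun x hx => hm x (by simp [hx]))

-- the splice does not change the number of open tags either
theorem pvPosCount_splice : ∀ (a : Nat) (w : List Char),
    pvCloseL <+: w.drop a → (∀ q < a, ¬ pvCloseL <+: w.drop q) →
    pvPosCount (w.take a ++ pvEddL ++ w.drop (a+6)) = pvPosCount w := by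
  intro a
  induction a using Nat.strong_induction_on with
  | _ a IH =>
    intro w hca hno
    have halen : a < w.length := by
      by_contra h
      rw [List.drop_eq_nil_of_le (by omega)] at hca
      exact absurd hca (by decide)
    rcases Nat.eq_zero_or_pos a with rfl | hapos
    · rw [List.drop_zero] at hca
      rw [List.take_zero, List.nil_append, Nat.zero_add,
        pvPosCount_append_no_lt pvEddL _ pvEdd_no_lt,
        pvPosCount_drop_no_open 6 w (fun q hq => by
          rcases Nat.eq_zero_or_pos q with rfl | hq0
          · simpa using fun hov => pvNot_close_of_open hov hca
          · exact (pvNoTag_inside_close hca hq0 hq).1)]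
    · have hc0 : ¬ pvCloseL <+: w := by simpa using hno 0 hapos
      by_cases ho : pvOpenL <+: w
      · have h28 : 28 ≤ a := by
          by_contra h
          exact (pvNoTag_inside_open ho hapos (by omega)).2 hca
        have htka : pvOpenL <+: w.take a :=
          List.prefix_take_iff.mpr ⟨ho, by rw [(by decide : pvOpenL.length = 28)]; omega⟩
        have hOw' : pvOpenL <+: w.take a ++ pvEddL ++ w.drop (a+6) := by
          obtain ⟨y, hy⟩ := htka
          exact ⟨y ++ (pvEddL ++ w.drop (a+6)), by rw [← List.append_assoc, hy, ← List.append_assoc]⟩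
        have hdrop28 : (w.take a ++ pvEddL ++ w.drop (a+6)).drop 28
            = (w.drop 28).take (a-28) ++ pvEddL ++ (w.drop 28).drop (a-28+6) := by
          rw [List.append_assoc, List.drop_append_of_le_length (by simp [List.length_take]; omega),
            List.drop_take, List.drop_drop, (by omega : 28 + (a-28+6) = a+6), List.append_assoc]
        rw [pvPosCount_open ho, pvPosCount_open hOw', hdrop28,
          IH (a-28) (by omega) (w.drop 28)
            (by rw [List.drop_drop, (by omega : 28 + (a-28) = a)]; exact hca)
            (fun q hq => by rw [List.drop_drop]; exact hno (28+q) (by omega))]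
      · obtain ⟨c, t, rfl⟩ : ∃ c t, w = c :: t := by
          cases w with
          | nil => simp at halen
          | cons c t => exact ⟨c, t, rfl⟩
        obtain ⟨a', rfl⟩ : ∃ a', a = a'+1 := ⟨a-1, by omega⟩
        have hw'eq : (c :: t).take (a'+1) ++ pvEddL ++ (c :: t).drop (a'+1+6)
            = c :: (t.take a' ++ pvEddL ++ t.drop (a'+6)) := by
          rw [List.take_succ_cons, (by omega : a'+1+6 = (a'+6)+1), List.drop_succ_cons]
          simp
        have htlen : a' ≤ t.length := by simp at halen; omega
        have hlen_take : (t.take a').length = a' := by simp [List.length_take]; omega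
        set t' := t.take a' ++ pvEddL ++ t.drop (a'+6) with ht'
        have hga : ∀ i : Nat, a' ≤ i → i < a' + 9 → t'[i]? = pvEddL[i - a']? := by
          intro i hi1 hi2
          rw [ht', List.append_assoc, List.getElem?_append_right (by rw [hlen_take]; exact hi1),
            List.getElem?_append_left (by rw [hlen_take, (by decide : pvEddL.length = 9)]; omega),
            hlen_take]
        have hOpen' : ¬ pvOpenL <+: c :: t' := by
          intro h
          by_cases hb : 28 ≤ a'+1
          · apply ho
            rw [List.prefix_iff_eq_take] at h ⊢
            exact h.trans (by
              rw [(by decide : pvOpenL.length = 28), ← hw'eq, List.append_assoc,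
                List.take_append_of_le_length (by simp [List.length_take]; omega),
                List.take_take, (by omega : min 28 (a'+1) = 28)])
          · have h1 : (c :: t')[a'+1]? = some '/' := by
              simp only [List.getElem?_cons_succ]
              rw [hga a' (le_refl _) (by omega), Nat.sub_self]
              decide
            have h2 := pvGet?_of_prefix h (q := a'+1)
              (by rw [(by decide : pvOpenL.length = 28)]; omega)
            rw [h1] at h2
            have h3 : ∀ i : Nat, i < 28 → pvOpenL[i]? ≠ some '/' := by decide
            exact h3 (a'+1) (by omega) h2.symm
        rw [hw'eq, pvPosCount_no_open_head ho, pvPosCount_no_open_head hOpen',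
          IH a' (by omega) t (by simpa using hca)
            (fun q hq => by simpa using hno (q+1) (by omega))]

-- Python's count over the whole string counts exactly the open-tag positions
theorem pvCountGo_eq : ∀ (fuel : Nat) (u : List Char) (acc : Nat), u.length ≤ fuel →
    PySem.Chars.count.go pvOpenL fuel u acc = acc + pvPosCount u
  | 0, u, acc, h => by
    obtain rfl : u = [] := List.eq_nil_of_length_eq_zero (by omega)
    rw [PySem.Chars.count.go.eq_def]
    simp [pvPosCount]
  | fuel+1, [], acc, h => by
    rw [PySem.Chars.count.go.eq_def]
    simp [pvPosCount]
  | fuel+1, c :: t, acc, h => by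
    rw [PySem.Chars.count.go.eq_def]
    by_cases hp : pvOpenL.isPrefixOf (c :: t)
    · have hpre := List.isPrefixOf_iff_prefix.mp hp
      have hlen2 : 28 ≤ (c :: t).length := by
        simpa [(by decide : pvOpenL.length = 28)] using hpre.length_le
      simp only [hp, if_true, (by decide : pvOpenL.length = 28)]
      rw [pvCountGo_eq fuel _ (acc+1)
          (by simp only [List.length_drop, List.length_cons] at h ⊢; omega),
        pvPosCount_open hpre]
      omega
    · simp only [hp, Bool.false_eq_true, if_false]
      rw [pvCountGo_eq fuel t acc (by simpa using h),
        pvPosCount_cons, if_neg hp]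
      omega

theorem pvCount_eq_posCount (u : List Char) : PySem.Chars.count u pvOpenL = pvPosCount u := by
  rw [PySem.Chars.count, if_neg (by decide), pvCountGo_eq u.length u 0 (le_refl _)]
  omega

theorem pvALoopL_eq_scan : ∀ (c : Nat) (s : List Char) (j : Nat), j ≤ s.length →
    pvPosCount (s.drop j) = c → (pvScan (s.drop j) 0).2 = 0 →
    pvALoopL c s (j : Int) = s.take j ++ (pvScan (s.drop j) 0).1
  | 0, s, j, hj, hcnt, hpend => by
    have hno := (pvPosCount_eq_zero_iff (s.drop j)).mp hcnt
    rw [pvALoopL, pvScan_skip (s.drop j).length (s.drop j) (le_refl _) (fun q _ => hno q),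
      List.drop_length, pvScan_nil]
    simp only [List.length_drop]
    have h1 : List.take (s.length - j) (List.drop j s) = List.drop j s := by
      rw [← List.length_drop, List.take_length]
    rw [h1]
    simp [List.take_append_drop]
  | cN+1, s, j, hj, hcnt, hpend => by
    -- the first open tag at or after j sits at position d = j + fn
    have hpos : 0 < pvPosCount (s.drop j) := by omega
    have hex : ∃ q, pvOpenL <+: (s.drop j).drop q := by
      by_contra h
      rw [not_exists] at h
      rw [(pvPosCount_eq_zero_iff (s.drop j)).mpr h] at hcnt
      omega
    have hfo : 0 ≤ PySem.Chars.find (s.drop j) pvOpenL := by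
      rw [PySem.Chars.find_nonneg_iff]
      obtain ⟨q, hq⟩ := hex
      exact (hq.isInfix).trans (List.drop_suffix q (s.drop j)).isInfix
    obtain ⟨hocc, homin⟩ := PySem.Chars.find_spec hfo
    set fn := (PySem.Chars.find (s.drop j) pvOpenL).toNat with hfn
    have hfle : fn ≤ (s.drop j).length := by
      have := PySem.Chars.find_le_length (s.drop j) pvOpenL
      omega
    set d := j + fn with hd
    have hvd : (s.drop j).drop fn = s.drop d := by rw [List.drop_drop, hd]
    have hod : pvOpenL <+: s.drop d := hvd ▸ hocc
    have h28 : d + 28 ≤ s.length := by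
      have h1 : 28 ≤ (s.drop d).length := by
        simpa [(by decide : pvOpenL.length = 28)] using hod.length_le
      simp only [List.length_drop] at h1
      omega
    set w := s.drop (d+28) with hw
    -- the value A's first find returns
    have hds : PySem.Chars.findFrom s pvOpenL ((j : Nat) : Int) = ((d : Nat) : Int) := by
      rw [PySem.Chars.findFrom_natCast s pvOpenL j hj, if_neg (by omega)]
      omega
    -- scan decomposition up to and including the open tag
    have hscan_u : pvScan (s.drop j) 0
        = ((s.drop j).take fn ++ (pvScan (s.drop d) 0).1, (pvScan (s.drop d) 0).2) := by
      rw [← hvd]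
      exact pvScan_skip fn (s.drop j) hfle homin
    have hscan_v : pvScan (s.drop d) 0 = (pvOpenL ++ (pvScan w 1).1, (pvScan w 1).2) := by
      rw [pvScan_open hod, hw, List.drop_drop]
    have hpend_w : (pvScan w 1).2 = 0 := by
      rw [hscan_u, hscan_v] at hpend
      exact hpend
    -- the matching close tag exists, at position e = d + 28 + a
    have hexc : ∃ q, pvCloseL <+: w.drop q := by
      by_contra h
      rw [not_exists] at h
      have := pvScan_pend_ge w 1 h
      omega
    have hfc : 0 ≤ PySem.Chars.find w pvCloseL := by
      rw [PySem.Chars.find_nonneg_iff]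
      obtain ⟨q, hq⟩ := hexc
      exact (hq.isInfix).trans (List.drop_suffix q w).isInfix
    obtain ⟨hca, hcmin⟩ := PySem.Chars.find_spec hfc
    set a := (PySem.Chars.find w pvCloseL).toNat with ha
    set e := d + 28 + a with he
    have he6 : e + 6 ≤ s.length := by
      have h1 : 6 ≤ (w.drop a).length := by
        simpa [(by decide : pvCloseL.length = 6)] using hca.length_le
      simp only [List.length_drop, hw] at h1
      omega
    have hde : PySem.Chars.findFrom s pvCloseL ((d : Nat) : Int) = ((e : Nat) : Int) := by
      rw [PySem.Chars.findFrom_natCast s pvCloseL d (by omega)]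
      have hfind : PySem.Chars.find (s.drop d) pvCloseL = ((28 + a : Nat) : Int) := by
        apply pvFind_eq_of_first (k := 28 + a)
        · rw [List.drop_drop, (by omega : d + (28 + a) = (d + 28) + a), ← List.drop_drop, ← hw]
          exact hca
        · intro q hq
          by_cases hq28 : q < 28
          · rcases Nat.eq_zero_or_pos q with rfl | hq0
            · simpa using pvNot_close_of_open hod
            · exact (pvNoTag_inside_open hod hq0 hq28).2
          · have h1 := hcmin (q-28) (by omega)
            rw [hw, List.drop_drop, (by omega : d + 28 + (q - 28) = d + q), ← List.drop_drop] at h1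
            exact h1
      rw [hfind, if_neg (by omega)]
      omega
    -- one iteration of A's loop
    rw [pvALoopL, hds, hde]
    have hslice1 : PySem.List.slice s none (some ((e : Nat) : Int)) = s.take e :=
      PySem.List.slice_to_natCast s e
    have hslice2 : PySem.List.slice s (some (((e : Nat) : Int) + 6)) none = s.drop (e+6) := by
      rw [(by push_cast; ring : ((e : Nat) : Int) + 6 = (((e+6 : Nat) : Nat) : Int))]
      exact PySem.List.slice_from_natCast s (e+6)
    rw [hslice1, hslice2]
    set s₂ := s.take e ++ pvEddL ++ s.drop (e+6) with hs2
    have hs2len : s₂.length = s.length + 3 := by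
      simp [hs2, List.length_take, (by decide : pvEddL.length = 9)]
      omega
    have hs2drop : s₂.drop (d+28) = w.take a ++ pvEddL ++ w.drop (a+6) := by
      rw [hs2, List.append_assoc, List.drop_append_of_le_length (by simp [List.length_take]; omega),
        List.drop_take, (by omega : e - (d+28) = a), hw, List.drop_drop,
        (by omega : d + 28 + (a+6) = e + 6), List.append_assoc]
    have hsplice := pvScan_splice a w 0 hca hcmin
    have hcntw : pvPosCount w = cN := by
      have h1 : pvPosCount (s.drop j) = pvPosCount (s.drop d) := by
        rw [← hvd]
        exact pvPosCount_drop_no_open fn (s.drop j) homin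
      have h2 : pvPosCount (s.drop d) = 1 + pvPosCount w := by
        rw [pvPosCount_open hod, hw, List.drop_drop]
      omega
    have hcnt2 : pvPosCount (s₂.drop (d+28)) = cN := by
      rw [hs2drop, pvPosCount_splice a w hca hcmin]
      exact hcntw
    have hpend2 : (pvScan (s₂.drop (d+28)) 0).2 = 0 := by
      rw [hs2drop, ← hsplice]
      exact hpend_w
    have hj2 : ((d : Nat) : Int) + 28 = (((d + 28 : Nat) : Nat) : Int) := by push_cast; ring
    rw [hj2, pvALoopL_eq_scan cN s₂ (d+28) (by omega) hcnt2 hpend2]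
    -- assemble both sides over the original string
    have htk : s₂.take (d+28) = s.take (d+28) := by
      rw [hs2, List.append_assoc, List.take_append_of_le_length (by simp [List.length_take]; omega),
        List.take_take, (by omega : min (d+28) e = d+28)]
    have htkd : s.take d = s.take j ++ (s.drop j).take fn := by
      rw [hd, List.take_add]
    have htkopen : s.take (d+28) = s.take d ++ pvOpenL := by
      rw [List.take_add]
      congr 1
      exact ((List.prefix_iff_eq_take.mp hod).trans
        (by rw [(by decide : pvOpenL.length = 28)])).symm
    rw [htk, hs2drop, ← hsplice, hscan_u, hscan_v]
    simp only [htkopen, htkd]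
    simp [List.append_assoc]


-- ---- the closed-form precondition implies the scan succeeds ----
theorem pvPosCountC_cons (c : Char) (t : List Char) :
    pvPosCountC (c :: t) = (if pvCloseL.isPrefixOf (c :: t) then 1 else 0) + pvPosCountC t := rfl

theorem pvPosCountC_drop_no_close : ∀ (k : Nat) (u : List Char),
    (∀ q < k, ¬ pvCloseL <+: u.drop q) → pvPosCountC u = pvPosCountC (u.drop k)
  | 0, u, _ => by simp
  | k+1, u, hno => by
    cases u with
    | nil => simp
    | cons c t =>
      rw [pvPosCountC_cons, if_neg (fun hb =>
          (hno 0 (by omega)) (by simpa using List.isPrefixOf_iff_prefix.mp hb)),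
        List.drop_succ_cons]
      simpa using pvPosCountC_drop_no_close k t (fun q hq => by simpa using hno (q+1) (by omega))

theorem pvPosCountC_close {u : List Char} (h : pvCloseL <+: u) :
    pvPosCountC u = 1 + pvPosCountC (u.drop 6) := by
  obtain ⟨c, t, rfl⟩ : ∃ c t, u = c :: t := by
    cases u with
    | nil => exact absurd h (by decide)
    | cons c t => exact ⟨c, t, rfl⟩
  rw [pvPosCountC_cons, if_pos (List.isPrefixOf_iff_prefix.mpr h),
    (by norm_num : (6:Nat) = 5+1), List.drop_succ_cons]
  congr 1
  exact pvPosCountC_drop_no_close 5 t (fun q hq => by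
    simpa using (pvNoTag_inside_close h (q := q+1) (by omega) (by omega)).2)

theorem pvScan_pend_zero : ∀ (u : List Char) (p : Nat),
    (∀ q, pvPosCount (u.drop q) ≤ pvPosCountC (u.drop q)) →
    p + pvPosCount u ≤ pvPosCountC u → (pvScan u p).2 = 0
  | [], p, _, hp => by
    rw [pvScan_nil]
    simpa [pvPosCount, pvPosCountC] using hp
  | c :: t, p, hq, hp => by
    by_cases h1 : 0 < p ∧ pvCloseL <+: (c :: t)
    · rw [pvScan_close h1.2 h1.1]
      have hC : pvPosCountC (c :: t) = 1 + pvPosCountC ((c :: t).drop 6) := pvPosCountC_close h1.2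
      have hO : pvPosCount (c :: t) = pvPosCount ((c :: t).drop 6) :=
        pvPosCount_drop_no_open 6 (c :: t) (fun q hqlt => by
          rcases Nat.eq_zero_or_pos q with rfl | hq0
          · simpa using fun hov => pvNot_close_of_open hov h1.2
          · exact (pvNoTag_inside_close h1.2 hq0 hqlt).1)
      exact pvScan_pend_zero ((c :: t).drop 6) (p-1)
        (fun q => by rw [List.drop_drop]; exact hq (6+q)) (by omega)
    · by_cases h2 : pvOpenL <+: (c :: t)
      · rw [pvScan_open h2]
        have hO : pvPosCount (c :: t) = 1 + pvPosCount ((c :: t).drop 28) := pvPosCount_open h2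
        have hC : pvPosCountC (c :: t) = pvPosCountC ((c :: t).drop 28) :=
          pvPosCountC_drop_no_close 28 (c :: t) (fun q hqlt => by
            rcases Nat.eq_zero_or_pos q with rfl | hq0
            · simpa using pvNot_close_of_open h2
            · exact (pvNoTag_inside_open h2 hq0 hqlt).2)
        exact pvScan_pend_zero ((c :: t).drop 28) (p+1)
          (fun q => by rw [List.drop_drop]; exact hq (28+q)) (by omega)
      · rw [pvScan_skip1 h1 h2]
        have hO : pvPosCount (c :: t) = pvPosCount t := by
          rw [pvPosCount_cons, if_neg (fun hb => h2 (List.isPrefixOf_iff_prefix.mp hb))]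
          omega
        by_cases hcl : pvCloseL <+: (c :: t)
        · -- a close with nothing pending is skipped: use the suffix condition at q = 6
          have hp0 : p = 0 := by
            rcases Nat.eq_zero_or_pos p with h | h
            · exact h
            · exact absurd ⟨h, hcl⟩ h1
          have hC : pvPosCountC (c :: t) = 1 + pvPosCountC t := by
            rw [pvPosCountC_cons, if_pos (List.isPrefixOf_iff_prefix.mpr hcl)]
          have hC6 : pvPosCountC (c :: t) = 1 + pvPosCountC ((c :: t).drop 6) := pvPosCountC_close hcl
          have hO6 : pvPosCount (c :: t) = pvPosCount ((c :: t).drop 6) :=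
            pvPosCount_drop_no_open 6 (c :: t) (fun q hqlt => by
              rcases Nat.eq_zero_or_pos q with rfl | hq0
              · simpa using fun hov => pvNot_close_of_open hov hcl
              · exact (pvNoTag_inside_close hcl hq0 hqlt).1)
          have hq6 := hq 6
          have hOt : pvPosCount t = pvPosCount ((c :: t).drop 6) := by rw [← hO6, hO]
          exact pvScan_pend_zero t p (fun q => by simpa using hq (q+1)) (by omega)
        · have hC : pvPosCountC (c :: t) = pvPosCountC t := by
            rw [pvPosCountC_cons, if_neg (fun hb => hcl (List.isPrefixOf_iff_prefix.mp hb))]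
            omega
          exact pvScan_pend_zero t p (fun q => by simpa using hq (q+1)) (by omega)
  termination_by u _ _ _ => u.length
  decreasing_by all_goals { simp only [List.drop_succ_cons, List.length_cons, List.length_drop]; omega }

-- ---- port bridges ----
theorem pvA_loop_toList : ∀ (n : Nat) (body : String) (j : Int),
    (pvA_loop n body j).toList = pvALoopL n body.toList j
  | 0, body, j => by rw [pvA_loop, pvALoopL]
  | n+1, body, j => by
    rw [pvA_loop, pvALoopL, pvA_loop_toList n _ _]
    congr 1 <;>
      simp [String.toList_append, PySem.Str.toList_slice, PySem.Str.findFrom_eq,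
        PySem.Chars.slice_eq_listSlice, pvOpenL, pvCloseL, pvEddL]

theorem pvB_go_eq : ∀ (fuel : Nat) (s : List Char) (i p : Nat) (acc : List Char),
    s.length - i ≤ fuel → pvB_go fuel s i p acc = acc ++ (pvScan (s.drop i) p).1
  | 0, s, i, p, acc, h => by
    rw [pvB_go, List.drop_eq_nil_of_le (by omega), pvScan_nil]
    simp
  | fuel+1, s, i, p, acc, h => by
    rw [pvB_go]
    by_cases hlt : i < s.length
    · rw [dif_pos hlt]
      have hdropc : s.drop i = s[i] :: s.drop (i+1) := List.drop_eq_getElem_cons hlt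
      by_cases hc : s[i] = '<'
      · rw [if_pos hc]
        by_cases h1 : 0 < p ∧ pvCloseL.isPrefixOf (s.drop i)
        · rw [if_pos h1, pvB_go_eq fuel s (i+6) (p-1) _ (by omega),
            pvScan_close (List.isPrefixOf_iff_prefix.mp h1.2) h1.1, List.drop_drop]
          simp [List.append_assoc]
        · rw [if_neg h1]
          by_cases h2 : pvOpenL.isPrefixOf (s.drop i)
          · rw [if_pos h2, pvB_go_eq fuel s (i+28) (p+1) _ (by omega),
              pvScan_open (List.isPrefixOf_iff_prefix.mp h2), List.drop_drop]
            simp [List.append_assoc]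
          · rw [if_neg h2, pvB_go_eq fuel s (i+1) p _ (by omega), hdropc,
              pvScan_skip1
                (fun hx => h1 ⟨hx.1, List.isPrefixOf_iff_prefix.mpr (hdropc ▸ hx.2)⟩)
                (fun hx => h2 (List.isPrefixOf_iff_prefix.mpr (hdropc ▸ hx)))]
            simp [List.append_assoc]
      · rw [if_neg hc, pvB_go_eq fuel s (i+1) p _ (by omega)]
        have hh := pvNotTag_of_head (u := s[i] :: s.drop (i+1)) (by simp only [List.head?_cons, ne_eq, Option.some.injEq]; exact hc)
        rw [hdropc, pvScan_skip1 (fun hx => hh.2 hx.2) hh.1]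
        simp [List.append_assoc]
    · rw [dif_neg hlt, List.drop_eq_nil_of_le (by omega), pvScan_nil]
      simp

-- ---- the dictionary phase ----
theorem pvDictFold_eq (req : List String) : ∀ (t : List String) (k : Nat) (d : PySem.Dict String String),
    req.drop k = t →
    (PySem.List.pyRange (k : Int) (PySem.List.len req)).foldl
      (fun d i => d.insert (PySem.List.pyGetD req i "") (pvDivTok i)) d
    = (PySem.List.enumerate t (k : Int)).foldl (fun d p => d.insert p.2 (pvDivTok p.1)) d
  | [], k, d, ht => by
    have hk : req.length ≤ k := by
      have := congrArg List.length ht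
      simp only [List.length_drop, List.length_nil] at this
      omega
    have hnil : PySem.List.pyRange (k : Int) (PySem.List.len req) = [] := by
      rw [List.eq_nil_iff_forall_not_mem]
      intro x hx
      rw [PySem.List.mem_pyRange_one] at hx
      simp only [PySem.List.len] at hx
      omega
    rw [hnil]
    simp [PySem.List.enumerate]
  | x :: t', k, d, ht => by
    have hk : k < req.length := by
      have := congrArg List.length ht
      simp only [List.length_drop, List.length_cons] at this
      omega
    rw [PySem.List.pyRange_one_cons (by simp only [PySem.List.len]; exact_mod_cast hk),
      List.foldl_cons, PySem.List.enumerate, List.foldl_cons]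
    have hget : PySem.List.pyGetD req (k : Int) "" = x := by
      rw [PySem.List.pyGetD_natCast, List.getD_eq_getElem?_getD, ← List.head?_drop, ht]
      rfl
    rw [hget]
    have ht' : req.drop (k+1) = t' := by rw [← List.tail_drop, ht]; rfl
    have hrec := pvDictFold_eq req t' (k+1) (d.insert x (pvDivTok (k : Int))) ht'
    rw [(by push_cast; ring : ((k+1 : Nat) : Int) = (k : Int) + 1)] at hrec
    exact hrec

theorem pvNodupFold : ∀ (l : List (Int × String)) (d : PySem.Dict String String),
    d.keys.Nodup → ((l.foldl (fun d p => d.insert p.2 (pvDivTok p.1)) d)).keys.Nodup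
  | [], _, h => h
  | x :: t, d, h => pvNodupFold t _ (PySem.Dict.nodup_keys_insert d x.2 (pvDivTok x.1) h)

theorem pvBaseNodup : (PySem.Dict.mk pvBaseSigns : PySem.Dict String String).keys.Nodup := by
  rw [PySem.Dict.keys_mk]; decide

theorem pvReplaceFold_eq (d : PySem.Dict String String) (h : d.keys.Nodup) (body : String) :
    d.keys.foldl (fun b k => PySem.Str.replace b k (d.getD k "")) body
    = d.items.foldl (fun b kv => PySem.Str.replace b kv.1 kv.2) body := by
  conv_rhs => rw [PySem.Dict.items_eq_map_keys d h ""]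
  rw [List.foldl_map]


-- ===== VERDICT (by name: the statement is the Claim_ definition above) =====
theorem replace_signs_html_to_dataframe_spec : Claim_equal_replace_signs_html_to_dataframe := by
  intro body req _hDom hpre
  unfold Spec_replace_signs_html_to_dataframe
  unfold Pre_replace_signs_html_to_dataframe at hpre
  have hqall : ∀ q, pvPosCount (body.toList.drop q) ≤ pvPosCountC (body.toList.drop q) := by
    intro q
    by_cases hql : q ≤ body.toList.length
    · exact hpre q hql
    · rw [List.drop_eq_nil_of_le (by omega)]
      exact le_refl _
  have hpend : (pvScan body.toList 0).2 = 0 :=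
    pvScan_pend_zero body.toList 0 hqall (by simpa using hqall 0)
  have hOeq : pvOpenS.toList = pvOpenL := rfl
  have hbody : pvA_loop (PySem.Str.count body pvOpenS) body 0
      = String.ofList (pvB_go body.toList.length body.toList 0 0 []) := by
    rw [← String.toList_inj, pvA_loop_toList, String.toList_ofList,
      pvB_go_eq body.toList.length body.toList 0 0 [] (by omega),
      PySem.Str.count_eq, hOeq, pvCount_eq_posCount]
    have hmain := pvALoopL_eq_scan (pvPosCount body.toList) body.toList 0 (by omega)
      (by rw [List.drop_zero]) (by rw [List.drop_zero]; exact hpend)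
    rw [Nat.cast_zero] at hmain
    rw [hmain]
    simp
  have hdict : (if 0 < PySem.List.len req then
        (PySem.List.pyRange 0 (PySem.List.len req)).foldl
          (fun d i => d.insert (PySem.List.pyGetD req i "") (pvDivTok i))
          (⟨pvBaseSigns⟩ : PySem.Dict String String)
      else (⟨pvBaseSigns⟩ : PySem.Dict String String))
      = (PySem.List.enumerate req).foldl (fun d p => d.insert p.2 (pvDivTok p.1))
          (⟨pvBaseSigns⟩ : PySem.Dict String String) := by
    by_cases h0 : 0 < PySem.List.len req
    · rw [if_pos h0]
      have h := pvDictFold_eq req req 0 (⟨pvBaseSigns⟩ : PySem.Dict String String) (by simp)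
      rw [Nat.cast_zero] at h
      exact h
    · rw [if_neg h0]
      obtain rfl : req = [] := by
        cases req with
        | nil => rfl
        | cons a t =>
          refine absurd ?_ h0
          simp only [PySem.List.len, List.length_cons]
          exact_mod_cast Nat.succ_pos t.length
      rfl
  simp only [replace_signs_html_to_dataframe, replace_signs_html_to_dataframe_alt]
  rw [hbody, hdict]
  exact pvReplaceFold_eq _ (pvNodupFold (PySem.List.enumerate req) _ pvBaseNodup) _
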